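-- pv_equiv track=rewrite | github.com/jasonleetucker-code/riskittogetthebrisket | src/utils/name_clean.py | _collapse_initials
-- ===== SOURCE A (Python) =====
-- def _collapse_initials(s: str) -> str:
--     """Collapse adjacent single-letter words into a single token.
--
--     'a j brown' → 'aj brown'
--     't j hockenson' → 'tj hockenson'
--     'd k metcalf' → 'dk metcalf'
--
--     This ensures 'T.J. Hockenson' (→ 't j hockenson') matches
--     'TJ Hockenson' (→ 'tj hockenson').
--     """
--     parts = s.split()
--     result = []
--     i = 0
--     while i < len(parts):
--         if len(parts[i]) == 1 and parts[i].isalpha():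
--             # Collect consecutive single-letter words
--             initials = parts[i]
--             while i + 1 < len(parts) and len(parts[i + 1]) == 1 and parts[i + 1].isalpha():
--                 i += 1
--                 initials += parts[i]
--             result.append(initials)
--         else:
--             result.append(parts[i])
--         i += 1
--     return " ".join(result)
-- ===== SOURCE B (Python) =====
-- def _collapse_initials(s: str) -> str:
--     out = []
--     prev_initial = False
--     for p in s.split():
--         cur = len(p) == 1 and p.isalpha()
--         if cur and prev_initial:
--             out[-1] += p
--         else:
--             out.append(p)
--         prev_initial = cur
--     return " ".join(out)
-- ===== Notes on version B (the rewrite author's own statement) =====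
-- stated objective: simpler
-- what changed: Replaces the index-driven while loop with a nested run-collecting scan by a single flat pass keeping a prev-was-initial flag and merging each single-letter word into the last emitted token.
import Mathlib
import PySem

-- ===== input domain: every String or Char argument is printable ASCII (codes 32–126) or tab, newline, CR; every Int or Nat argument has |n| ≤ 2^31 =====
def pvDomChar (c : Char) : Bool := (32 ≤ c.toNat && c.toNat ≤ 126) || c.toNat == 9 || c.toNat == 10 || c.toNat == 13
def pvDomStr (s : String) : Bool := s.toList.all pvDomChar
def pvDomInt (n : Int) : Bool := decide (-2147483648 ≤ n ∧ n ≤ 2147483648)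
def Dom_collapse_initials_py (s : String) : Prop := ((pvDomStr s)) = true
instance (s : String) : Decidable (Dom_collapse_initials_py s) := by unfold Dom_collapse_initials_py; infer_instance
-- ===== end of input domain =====

-- B replaces A's index-driven nested while loops by a single flat pass with a prev-flag,
-- merging single-letter words into the last emitted token (objective: simpler).

-- ===== PORT A =====
-- the test 'len(p) == 1 and p.isalpha()'
def pvIsInitial (w : String) : Bool := (PySem.Str.len w == 1) && PySem.Str.strIsalpha w

-- A's inner while: 'while i+1 < len(parts) and single-letter: i += 1; initials += parts[i]'
-- (recursion over the remaining suffix of parts; returns the collected token and the rest)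
def pvACollect (ini : String) : List String → String × List String
  | [] => (ini, [])
  | w :: ws => if pvIsInitial w then pvACollect (ini ++ w) ws else (ini, w :: ws)

theorem pvACollect_snd_le (ini : String) (ws : List String) :
    (pvACollect ini ws).2.length ≤ ws.length := by
  induction ws generalizing ini with
  | nil => simp [pvACollect]
  | cons w ws ih =>
    simp only [pvACollect]
    split
    · exact le_trans (ih _) (Nat.le_succ _)
    · simp

-- A's outer while over parts, building 'result'
def pvAGo : List String → List String
  | [] => []
  | w :: ws =>
    if pvIsInitial w then
      (pvACollect w ws).1 :: pvAGo (pvACollect w ws).2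
    else
      w :: pvAGo ws
termination_by ws => ws.length
decreasing_by
  · exact Nat.lt_succ_of_le (pvACollect_snd_le w ws)
  · simp

def collapse_initials_py (s : String) : String :=
  PySem.Str.join " " (pvAGo (PySem.Str.split₀ s))

-- ===== PORT B =====
-- 'out[-1] += p' (only reached with out nonempty in Source B; [] case is unreachable filler)
def pvAppendLast (out : List String) (p : String) : List String :=
  match out with
  | [] => [p]
  | [x] => [x ++ p]
  | x :: xs => x :: pvAppendLast xs p

-- Source B's single for-loop, state = (out, prev_initial)
def pvBLoop : List String → List String → Bool → List String
  | [], out, _ => out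
  | p :: ps, out, prev =>
    let cur := pvIsInitial p
    if cur && prev then pvBLoop ps (pvAppendLast out p) cur
    else pvBLoop ps (out ++ [p]) cur

def collapse_initials_py_alt (s : String) : String :=
  PySem.Str.join " " (pvBLoop (PySem.Str.split₀ s) [] false)

-- ===== PRECONDITION & SPEC =====
def Spec_collapse_initials_py (s : String) (out : String) : Prop := out = collapse_initials_py_alt s
instance (s : String) (out : String) : Decidable (Spec_collapse_initials_py s out) := by unfold Spec_collapse_initials_py; infer_instance

-- ===== CLAIM (what is proved, stated in full; the proofs are below) =====
def Claim_equal_collapse_initials_py : Prop := ∀ (s : String), Dom_collapse_initials_py s → Spec_collapse_initials_py s (collapse_initials_py s)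

-- ===== LEMMAS AND PROOFS =====
theorem pvAppendLast_snoc (out : List String) (ini p : String) :
    pvAppendLast (out ++ [ini]) p = out ++ [ini ++ p] := by
  induction out with
  | nil => rfl
  | cons x xs ih =>
    cases xs with
    | nil => simp [pvAppendLast]
    | cons y ys => simpa [pvAppendLast] using ih

-- the two loops agree: B with prev = false continues like A's outer loop,
-- B with prev = true (last output token = ini) continues like A's inner collecting loop
theorem pvLoop_agree (ws : List String) :
    (∀ out, pvBLoop ws out false = out ++ pvAGo ws) ∧
    (∀ out ini, pvBLoop ws (out ++ [ini]) true
        = out ++ (pvACollect ini ws).1 :: pvAGo (pvACollect ini ws).2) := by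
  induction ws with
  | nil => simp [pvBLoop, pvAGo, pvACollect]
  | cons p ps ih =>
    obtain ⟨ih1, ih2⟩ := ih
    constructor
    · intro out
      by_cases h : pvIsInitial p = true
      · simp only [pvBLoop, pvAGo, h, Bool.and_false]
        exact ih2 out p
      · simp only [pvBLoop, pvAGo, h, Bool.false_and]
        rw [ih1 (out ++ [p])]
        simp
    · intro out ini
      by_cases h : pvIsInitial p = true
      · simp only [pvBLoop, pvACollect, h, Bool.and_self, if_true]
        rw [pvAppendLast_snoc, ih2 out (ini ++ p)]
      · simp only [pvBLoop, pvACollect, h, Bool.false_and]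
        rw [List.append_assoc, ih1 (out ++ ([ini] ++ [p]))]
        simp [pvAGo, h]

-- ===== VERDICT (by name: the statement is the Claim_ definition above) =====
theorem collapse_initials_py_spec : Claim_equal_collapse_initials_py := by
  intro s _
  unfold Spec_collapse_initials_py collapse_initials_py collapse_initials_py_alt
  rw [(pvLoop_agree (PySem.Str.split₀ s)).1 []]
  rfl
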